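-- pv_equiv track=rewrite | github.com/hamdan-codes/codechef-unrated-contests | HackCon_Ravi Plan.py | getMaxLength0
-- ===== SOURCE A (Python) =====
-- def getMaxLength0(arr, n):
--     count = 0
--     result = 0
--     for i in range(0, 2*n):
--         if (arr[i%n] == 1):
--             count = 0
--         else:
--             count+= 1
--             result = max(result, count)
--
--     return result
-- ===== SOURCE B (Python) =====
-- def getMaxLength0(arr, n):
--     # Gap-based: positions of the 1s in the doubled prefix arr[:n]*2; the answer is the
--     # largest gap between consecutive 1s (including the two ends), or 2*n if there is no 1.
--     if n <= 0:
--         return 0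
--     doubled = arr[:n] * 2
--     ones = [i for i, x in enumerate(doubled) if x == 1]
--     if not ones:
--         return 2 * n
--     gaps = [ones[0]] + [b - a - 1 for a, b in zip(ones, ones[1:])] + [2 * n - 1 - ones[-1]]
--     return max(gaps)
-- ===== Notes on version B (the rewrite author's own statement) =====
-- stated objective: alternative
-- what changed: Replaces the index-modulo counter loop over range(2n) with a gap computation: collect the positions of the 1s in the doubled prefix arr[:n]*2 and return the largest gap between consecutive 1s (including both ends), 2n if there is no 1, 0 if n <= 0.
import Mathlib
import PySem

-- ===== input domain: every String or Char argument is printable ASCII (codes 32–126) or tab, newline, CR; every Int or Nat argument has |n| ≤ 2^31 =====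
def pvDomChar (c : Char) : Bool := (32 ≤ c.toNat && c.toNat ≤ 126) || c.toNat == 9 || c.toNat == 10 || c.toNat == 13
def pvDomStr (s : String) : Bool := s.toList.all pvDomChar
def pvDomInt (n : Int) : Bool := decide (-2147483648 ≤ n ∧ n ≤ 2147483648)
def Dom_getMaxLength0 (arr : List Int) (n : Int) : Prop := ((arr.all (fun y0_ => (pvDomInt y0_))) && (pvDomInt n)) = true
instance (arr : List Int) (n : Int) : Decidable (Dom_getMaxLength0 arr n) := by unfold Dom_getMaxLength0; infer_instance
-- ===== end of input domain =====

-- B replaces A's modulo-indexed counter loop by a gap computation over the positions of the 1s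
-- in the doubled prefix (objective: alternative decomposition, same O(n) cost).


-- ===== PORT A =====
-- for i in range(0, 2*n): if arr[i % n] == 1: count = 0 else: count += 1; result = max(result, count)
-- arr[i % n] is ported as pyGetD with default 0; under Pre_ (n ≤ len(arr)) the index is always in range.
def getMaxLength0 (arr : List Int) (n : Int) : Int :=
  ((PySem.List.pyRange 0 (2 * n) 1).foldl
    (fun (st : Int × Int) i =>
      if PySem.List.pyGetD arr (PySem.Int.mod i n) 0 = 1 then (0, st.2)
      else (st.1 + 1, max st.2 (st.1 + 1)))
    ((0 : Int), (0 : Int))).2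

-- ===== PORT B =====
-- doubled = arr[:n] * 2; ones = [i for i, x in enumerate(doubled) if x == 1]
def getMaxLength0_alt (arr : List Int) (n : Int) : Int :=
  if n ≤ 0 then 0
  else
    match ((PySem.List.enumerate
        (PySem.List.slice arr none (some n) ++ PySem.List.slice arr none (some n)) 0).filter
        (fun ix => ix.2 == 1)).map (fun ix => ix.1) with
    | [] => 2 * n
    | p :: ps =>
      -- gaps = [ones[0]] + [b-a-1 for a,b in zip(ones, ones[1:])] + [2*n-1-ones[-1]]; max(gaps)
      -- max over the nonempty list p :: rest is ported as rest.foldl max p (exact for ints).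
      (List.zipWith (fun a b => b - a - 1) (p :: ps) ps ++ [2 * n - 1 - ps.getLastD p]).foldl
        (fun a b => max a b) p

-- ===== PRECONDITION & SPEC =====
-- Pre_ excludes exactly the inputs where A raises IndexError: n > len(arr) (then arr[i % n] is out of range).
def Pre_getMaxLength0 (arr : List Int) (n : Int) : Prop := n ≤ (arr.length : Int)
instance (arr : List Int) (n : Int) : Decidable (Pre_getMaxLength0 arr n) := by unfold Pre_getMaxLength0; infer_instance
def pvWitness_getMaxLength0 : List Int × Int := ([0, 1, 0], 3)

def Spec_getMaxLength0 (arr : List Int) (n : Int) (out : Int) : Prop := out = getMaxLength0_alt arr n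
instance (arr : List Int) (n : Int) (out : Int) : Decidable (Spec_getMaxLength0 arr n out) := by unfold Spec_getMaxLength0; infer_instance

-- ===== CLAIM (what is proved, stated in full; the proofs are below) =====
def Claim_equal_getMaxLength0 : Prop := ∀ (arr : List Int) (n : Int), Dom_getMaxLength0 arr n → Pre_getMaxLength0 arr n → Spec_getMaxLength0 arr n (getMaxLength0 arr n)

-- ===== LEMMAS AND PROOFS =====

-- Longest run of non-1s in L, where c non-1s immediately precede L.
def pvG (c : Int) : List Int → Int
  | [] => c
  | x :: xs => if x = 1 then max c (pvG 0 xs) else pvG (c + 1) xs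

-- Positions (0-based) of the 1s in a list.
def pvOnes : List Int → List Int
  | [] => []
  | x :: xs => if x = 1 then 0 :: (pvOnes xs).map (· + 1) else (pvOnes xs).map (· + 1)

-- Max gap given previous 1 at position prev, remaining 1s at ps, total length m.
def pvR (prev : Int) (ps : List Int) (m : Int) : Int :=
  match ps with
  | [] => m - 1 - prev
  | q :: qs => max (q - prev - 1) (pvR q qs m)

-- The answer as a function of the 1-positions os of a list of length m, with c preceding non-1s.
def pvCase (c : Int) (os : List Int) (m : Int) : Int :=
  match os with
  | [] => c + m
  | p :: ps => max (c + p) (pvR p ps m)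

theorem pvG_ge (L : List Int) : ∀ c : Int, c ≤ pvG c L := by
  induction L with
  | nil => intro c; simp [pvG]
  | cons x xs ih =>
    intro c
    by_cases h : x = 1
    · simp [pvG, h]
    · simp only [pvG, if_neg h]
      exact le_trans (by omega) (ih (c + 1))

theorem pvFold_snd (L : List Int) : ∀ c r : Int, 0 ≤ c → c ≤ r →
    (L.foldl (fun (st : Int × Int) x =>
      if x = 1 then ((0 : Int), st.2) else (st.1 + 1, max st.2 (st.1 + 1))) (c, r)).2
    = max r (pvG c L) := by
  induction L with
  | nil => intro c r _ hcr; simp [pvG, max_eq_left hcr]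
  | cons x xs ih =>
    intro c r hc hcr
    by_cases h : x = 1
    · simp only [List.foldl_cons, if_pos h, pvG, ih 0 r le_rfl (le_trans hc hcr)]
      rw [max_comm c (pvG 0 xs), ← max_assoc]
      exact (max_eq_left (le_trans hcr (le_max_left r _))).symm
    · simp only [List.foldl_cons, if_neg h, pvG]
      rw [ih (c + 1) (max r (c + 1)) (by omega) (le_max_right _ _)]
      have h1 : c + 1 ≤ pvG (c + 1) xs := pvG_ge xs (c + 1)
      rw [max_assoc]
      congr 1
      omega

theorem pvR_shift (ps : List Int) : ∀ prev m : Int,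
    pvR (prev + 1) (ps.map (· + 1)) (m + 1) = pvR prev ps m := by
  induction ps with
  | nil => intro prev m; simp [pvR]; ring
  | cons q qs ih =>
    intro prev m
    simp only [List.map_cons, pvR, ih q m]
    congr 1
    ring

theorem pvShift_map (l : List Int) (s : Int) :
    (l.map (· + 1)).map (· + s) = l.map (· + (s + 1)) := by
  rw [List.map_map]
  apply List.map_congr_left
  intro a _
  simp only [Function.comp_apply]
  ring

theorem pvG_eq_onesCase (L : List Int) : ∀ c : Int,
    pvG c L = pvCase c (pvOnes L) (L.length : Int) := by
  induction L with
  | nil => intro c; simp [pvG, pvOnes, pvCase]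
  | cons x xs ih =>
    intro c
    by_cases h : x = 1
    · rw [show pvG c (x :: xs) = max c (pvG 0 xs) from by simp [pvG, h]]
      rw [show pvOnes (x :: xs) = 0 :: (pvOnes xs).map (· + 1) from by simp [pvOnes, h]]
      rw [ih 0]
      cases hxs : pvOnes xs with
      | nil =>
        simp only [pvCase, List.map_nil, List.length_cons, pvR]
        push_cast
        omega
      | cons p ps =>
        simp only [pvCase, List.map_cons, pvR, List.length_cons]
        push_cast
        rw [show ((xs.length : Int) + 1) = (xs.length : Int) + 1 from rfl]
        have hs : pvR (p + 1) (ps.map (· + 1)) ((xs.length : Int) + 1) = pvR p ps (xs.length : Int) := by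
          exact_mod_cast pvR_shift ps p (xs.length : Int)
        rw [hs]
        omega
    · rw [show pvG c (x :: xs) = pvG (c + 1) xs from by simp [pvG, h]]
      rw [show pvOnes (x :: xs) = (pvOnes xs).map (· + 1) from by simp [pvOnes, h]]
      rw [ih (c + 1)]
      cases hxs : pvOnes xs with
      | nil =>
        simp only [pvCase, List.map_nil, List.length_cons]
        push_cast
        omega
      | cons p ps =>
        simp only [pvCase, List.map_cons, List.length_cons]
        push_cast
        have hs : pvR (p + 1) (ps.map (· + 1)) ((xs.length : Int) + 1) = pvR p ps (xs.length : Int) := by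
          exact_mod_cast pvR_shift ps p (xs.length : Int)
        rw [hs]
        omega

theorem pvEnum_filter (L : List Int) : ∀ s : Int,
    ((PySem.List.enumerate L s).filter (fun ix => ix.2 == 1)).map (fun ix => ix.1)
    = (pvOnes L).map (· + s) := by
  induction L with
  | nil => intro s; simp [PySem.List.enumerate_nil, pvOnes]
  | cons x xs ih =>
    intro s
    rw [PySem.List.enumerate_cons]
    by_cases h : x = 1
    · rw [show pvOnes (x :: xs) = 0 :: (pvOnes xs).map (· + 1) from by simp [pvOnes, h]]
      simp only [List.filter_cons, show ((s, x).2 == (1 : Int)) = true from by simp [h],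
        if_true, List.map_cons, ih (s + 1), pvShift_map]
      simp
    · rw [show pvOnes (x :: xs) = (pvOnes xs).map (· + 1) from by simp [pvOnes, h]]
      simp only [List.filter_cons, show ((s, x).2 == (1 : Int)) = false from by simp [h],
        Bool.false_eq_true, if_false, ih (s + 1), pvShift_map]

theorem pvFoldMax_eq_R (ps : List Int) : ∀ p acc m : Int,
    (List.zipWith (fun a b => b - a - 1) (p :: ps) ps ++ [m - 1 - ps.getLastD p]).foldl
      (fun a b => max a b) acc = max acc (pvR p ps m) := by
  induction ps with
  | nil => intro p acc m; simp [pvR]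
  | cons q qs ih =>
    intro p acc m
    simp only [List.zipWith_cons_cons, List.getLastD_cons, List.cons_append, List.foldl_cons,
      ih q (max acc (q - p - 1)) m, pvR, max_assoc]

-- ===== VERDICT (by name: the statement is the Claim_ definition above) =====
theorem getMaxLength0_spec : Claim_equal_getMaxLength0 := by
  intro arr n _ hpre
  unfold Pre_getMaxLength0 at hpre
  unfold Spec_getMaxLength0 getMaxLength0 getMaxLength0_alt
  by_cases hn : n ≤ 0
  · rw [PySem.List.pyRange_one_eq_nil (by omega), if_pos hn]
    simp
  · rw [if_neg hn]
    have hn' : 0 < n := by omega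
    have hlen : n.toNat ≤ arr.length := by omega
    have hslice : PySem.List.slice arr none (some n) = arr.take n.toNat :=
      PySem.List.slice_to arr (by omega)
    set L : List Int := arr.take n.toNat ++ arr.take n.toNat with hL
    have hLlen : (L.length : Int) = 2 * n := by
      simp only [hL, List.length_append, List.length_take, Nat.min_eq_left hlen]
      push_cast
      omega
    -- Step 1: A's fold over range(0, 2n) reading arr[i % n] is the fold over the doubled prefix L
    have hmap : (PySem.List.pyRange 0 (2 * n) 1).map
        (fun i => PySem.List.pyGetD arr (PySem.Int.mod i n) 0) = L := by
      rw [PySem.List.pyRange_one_append 0 n (2 * n) (by omega) (by omega), List.map_append]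
      have hhalf : ∀ a : Int, n ∣ a →
          (PySem.List.pyRange a (a + n) 1).map (fun i => PySem.List.pyGetD arr (PySem.Int.mod i n) 0)
          = arr.take n.toNat := by
        intro a ha
        rw [PySem.List.pyRange_one a (a + n), List.map_map]
        apply List.ext_getElem
        · simp only [List.length_map, List.length_range, List.length_take]
          omega
        · intro k hk1 hk2
          simp only [List.getElem_map, List.getElem_range, Function.comp_apply, List.getElem_take]
          have hk : k < n.toNat := by
            simp only [List.length_map, List.length_range] at hk1
            omega
          have hmod : PySem.Int.mod (a + (k : Int)) n = (k : Int) := by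
            rw [PySem.Int.mod_eq_emod_of_pos hn']
            obtain ⟨t, rfl⟩ := ha
            rw [show n * t + (k : Int) = (k : Int) + n * t from by ring,
              Int.add_mul_emod_self_left, Int.emod_eq_of_lt (by omega) (by omega)]
          rw [hmod, PySem.List.pyGetD_natCast]
          exact List.getD_eq_getElem arr 0 (by omega)
      have h0 : (0 : Int) + n = n := by ring
      have h2 : n + n = 2 * n := by ring
      rw [hL]
      congr 1
      · have := hhalf 0 ⟨0, by ring⟩; rwa [h0] at this
      · have := hhalf n ⟨1, by ring⟩; rwa [h2] at this
    have hkey : (PySem.List.pyRange 0 (2 * n) 1).foldl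
        (fun (st : Int × Int) i =>
          if PySem.List.pyGetD arr (PySem.Int.mod i n) 0 = 1 then ((0 : Int), st.2)
          else (st.1 + 1, max st.2 (st.1 + 1))) ((0 : Int), (0 : Int))
        = L.foldl (fun (st : Int × Int) x =>
          if x = 1 then ((0 : Int), st.2) else (st.1 + 1, max st.2 (st.1 + 1))) ((0 : Int), (0 : Int)) := by
      rw [← hmap]
      exact (List.foldl_map
        (f := fun i => PySem.List.pyGetD arr (PySem.Int.mod i n) 0)
        (g := fun (st : Int × Int) x =>
          if x = 1 then ((0 : Int), st.2) else (st.1 + 1, max st.2 (st.1 + 1)))).symm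
    rw [hkey, pvFold_snd L 0 0 le_rfl le_rfl, max_eq_right (pvG_ge L 0), hslice, ← hL]
    -- Step 2: B's gap computation also equals pvG 0 L
    have hones : ((PySem.List.enumerate L 0).filter (fun ix => ix.2 == 1)).map (fun ix => ix.1)
        = pvOnes L := by
      rw [pvEnum_filter L 0]
      simp
    rw [hones, pvG_eq_onesCase L 0]
    cases hO : pvOnes L with
    | nil => simp [pvCase, hLlen]
    | cons p ps =>
      simp only [pvCase, hLlen, pvFoldMax_eq_R]
      omega
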